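-- pv_equiv track=rewrite | github.com/dorrinsam/CS_Hero | main.py | check_same_digits
-- ===== SOURCE A (Python) =====
-- def check_same_digits(phone):
--     phone = sorted(phone)
--     prev_repeat = 1
--     for i in range(1, len(phone)):
--         if phone[i] == phone[i - 1]:
--             prev_repeat += 1
--         else:
--             prev_repeat = 1
--
--         if prev_repeat >= 4:
--             return True
--     return False
-- ===== SOURCE B (Python) =====
-- def check_same_digits(phone):
--     counts = {}
--     for ch in phone:
--         counts[ch] = counts.get(ch, 0) + 1
--     return any(v >= 4 for v in counts.values())
-- ===== Notes on version B (the rewrite author's own statement) =====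
-- stated objective: faster
-- what changed: Replaces sort-then-scan-for-adjacent-runs with a single-pass frequency dictionary checked for any count >= 4.
import Mathlib
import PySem

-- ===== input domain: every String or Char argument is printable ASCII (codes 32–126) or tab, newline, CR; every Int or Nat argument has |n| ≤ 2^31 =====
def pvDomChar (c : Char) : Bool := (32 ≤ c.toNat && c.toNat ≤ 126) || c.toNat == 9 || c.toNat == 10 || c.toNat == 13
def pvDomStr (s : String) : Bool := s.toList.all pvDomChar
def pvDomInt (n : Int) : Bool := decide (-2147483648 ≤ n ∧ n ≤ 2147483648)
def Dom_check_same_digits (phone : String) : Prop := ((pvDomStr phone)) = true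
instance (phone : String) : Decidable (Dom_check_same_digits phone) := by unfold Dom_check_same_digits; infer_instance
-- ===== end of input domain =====

-- B replaces A's sort-then-scan for an adjacent run of length 4 with a single-pass frequency dictionary (simpler, no sort).

-- ===== PORT A =====
-- A's for-loop over i in range(1, len(phone)) reads phone[i] and phone[i-1] and carries prev_repeat,
-- with an early return; ported as the obvious structural recursion over the sorted list's tail,
-- carrying prev (= phone[i-1]) and prev_repeat
def pvALoop : List Char → Char → Int → Bool
  | [], _, _ => false
  | c :: rest, prev, r =>
    let r' := if c = prev then r + 1 else 1
    if 4 ≤ r' then true else pvALoop rest c r'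

def check_same_digits (phone : String) : Bool :=
  match PySem.List.sorted phone.toList (fun x => x) false with
  | [] => false
  | p :: rest => pvALoop rest p 1

-- ===== PORT B =====
def check_same_digits_alt (phone : String) : Bool :=
  let counts : PySem.Dict Char Int :=
    phone.toList.foldl (fun d ch => d.insert ch (d.getD ch 0 + 1)) PySem.Dict.empty
  counts.values.any (fun v => decide (4 ≤ v))

-- ===== PRECONDITION & SPEC =====
def Spec_check_same_digits (phone : String) (out : Bool) : Prop := out = check_same_digits_alt phone
instance (phone : String) (out : Bool) : Decidable (Spec_check_same_digits phone out) := by unfold Spec_check_same_digits; infer_instance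

-- ===== CLAIM (what is proved, stated in full; the proofs are below) =====
def Claim_equal_check_same_digits : Prop := ∀ (phone : String), Dom_check_same_digits phone → Spec_check_same_digits phone (check_same_digits phone)

-- ===== LEMMAS AND PROOFS =====

-- invariant of A's run-length scan on a sorted tail: prev precedes l, its run so far has length r (1 ≤ r ≤ 3);
-- the scan hits a run of 4 iff prev's total count reaches 4 or some later value has count ≥ 4
theorem pvALoop_iff (l : List Char) (prev : Char) (r : Int)
    (hs : l.Pairwise (· ≤ ·)) (hle : ∀ x ∈ l, prev ≤ x) (h1 : 1 ≤ r) (h3 : r ≤ 3) :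
    (pvALoop l prev r = true ↔ 4 ≤ r + (l.count prev : Int) ∨ ∃ c ∈ l, c ≠ prev ∧ 4 ≤ l.count c) := by
  induction l generalizing prev r with
  | nil => simp [pvALoop]; omega
  | cons x xs ih =>
    rw [List.pairwise_cons] at hs
    obtain ⟨hx, hxs⟩ := hs
    have hprevx : prev ≤ x := hle x (by simp)
    by_cases hxp : x = prev
    · subst hxp
      by_cases h4 : (4:Int) ≤ r + 1
      · have : pvALoop (x :: xs) x r = true := by
          simp [pvALoop, h4]
        rw [this]
        simp only [true_iff]
        left
        simp [List.count_cons_self]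
        omega
      · have hstep : pvALoop (x :: xs) x r = pvALoop xs x (r + 1) := by
          simp [pvALoop, h4]
        rw [hstep, ih x (r+1) hxs hx (by omega) (by omega)]
        constructor
        · rintro (h | ⟨c, hc, hcx, hcnt⟩)
          · left; simp [List.count_cons_self]; omega
          · right; exact ⟨c, by simp [hc], hcx, by simpa [List.count_cons, Ne.symm hcx] using hcnt⟩
        · rintro (h | ⟨c, hc, hcx, hcnt⟩)
          · left; simp [List.count_cons_self] at h; omega
          · right
            rcases List.mem_cons.mp hc with rfl | hc'
            · exact absurd rfl hcx
            · exact ⟨c, hc', hcx, by simpa [List.count_cons, Ne.symm hcx] using hcnt⟩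
    · have hlt : prev < x := lt_of_le_of_ne hprevx (fun h => hxp h.symm)
      have hstep : pvALoop (x :: xs) prev r = pvALoop xs x 1 := by
        simp [pvALoop, hxp]
      have hnprev : ∀ y ∈ xs, y ≠ prev := fun y hy h =>
        absurd (lt_of_lt_of_le hlt (hx y hy)) (by rw [h]; exact lt_irrefl prev)
      have hcnt0 : (x :: xs).count prev = 0 := by
        rw [List.count_eq_zero]
        rintro (_ | h)
        · exact hxp rfl
        · next h' => exact hnprev prev h' rfl
      rw [hstep, ih x 1 hxs hx (by omega) (by omega), hcnt0]
      constructor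
      · rintro (h | ⟨c, hc, hcx, hcnt⟩)
        · right
          refine ⟨x, by simp, fun h' => hxp h', ?_⟩
          simp [List.count_cons_self]; omega
        · right
          exact ⟨c, by simp [hc], hnprev c hc, by simpa [List.count_cons, Ne.symm hcx] using hcnt⟩
      · rintro (h | ⟨c, hc, hcp, hcnt⟩)
        · omega
        · rcases List.mem_cons.mp hc with rfl | hc'
          · left; simp [List.count_cons_self] at hcnt; omega
          · by_cases hcx : c = x
            · subst hcx; left; simp [List.count_cons_self] at hcnt; omega
            · right; exact ⟨c, hc', hcx, by simpa [List.count_cons, Ne.symm hcx] using hcnt⟩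

theorem check_same_digits_iff (phone : String) :
    check_same_digits phone = true ↔ ∃ c ∈ phone.toList, 4 ≤ phone.toList.count c := by
  unfold check_same_digits
  have hperm := PySem.List.sorted_perm phone.toList (fun x => x) false
  rcases hsort : PySem.List.sorted phone.toList (fun x => x) false with _ | ⟨p, rest⟩
  · rw [hsort] at hperm
    have : phone.toList = [] := hperm.symm.eq_nil
    simp [this]
  · rw [hsort] at hperm
    have hpw : (p :: rest).Pairwise (· ≤ ·) := by
      have := PySem.List.sorted_pairwise phone.toList (fun x => x)
      rwa [hsort] at this
    rw [List.pairwise_cons] at hpw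
    rw [pvALoop_iff rest p 1 hpw.2 hpw.1 (by omega) (by omega)]
    constructor
    · rintro (h | ⟨c, hc, hcp, hcnt⟩)
      · refine ⟨p, hperm.mem_iff.mp (by simp), ?_⟩
        rw [← hperm.count_eq]
        simp [List.count_cons_self]; omega
      · refine ⟨c, hperm.mem_iff.mp (by simp [hc]), ?_⟩
        rw [← hperm.count_eq]
        simpa [List.count_cons, Ne.symm hcp] using hcnt
    · rintro ⟨c, hc, hcnt⟩
      rw [← hperm.count_eq] at hcnt
      by_cases hcp : c = p
      · subst hcp
        left; simp [List.count_cons_self] at hcnt; omega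
      · right
        refine ⟨c, ?_, hcp, ?_⟩
        · rcases List.mem_cons.mp (hperm.mem_iff.mpr hc) with rfl | h
          · exact absurd rfl hcp
          · exact h
        · simpa [List.count_cons, Ne.symm hcp] using hcnt

theorem check_same_digits_alt_iff (phone : String) :
    check_same_digits_alt phone = true ↔ ∃ c ∈ phone.toList, 4 ≤ phone.toList.count c := by
  unfold check_same_digits_alt
  rw [PySem.Dict.foldl_insert_getD_add_one_eq_counter]
  simp only [PySem.Dict.values, PySem.Dict.items_counter, List.map_map, List.any_eq_true,
    List.mem_map, Function.comp]
  constructor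
  · rintro ⟨_, ⟨c, hc, rfl⟩, h⟩
    exact ⟨c, (PySem.Set.mem_ofList _ _).mp hc, by simp at h; exact_mod_cast h⟩
  · rintro ⟨c, hc, hcnt⟩
    exact ⟨_, ⟨c, (PySem.Set.mem_ofList _ _).mpr hc, rfl⟩, by simp; exact_mod_cast hcnt⟩

-- ===== VERDICT (by name: the statement is the Claim_ definition above) =====
theorem check_same_digits_spec : Claim_equal_check_same_digits := by
  intro phone _
  unfold Spec_check_same_digits
  rw [Bool.eq_iff_iff, check_same_digits_iff, check_same_digits_alt_iff]
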